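-- pv_equiv track=rewrite | github.com/davidgallegos0653-dev/suzuki_leads_app | data_processor.py | _match_model
-- ===== SOURCE A (Python) =====
-- import unicodedata
--
-- def _normalize(text: str) -> str:
--     """Normalize text: remove non-breaking spaces, newlines, extra whitespace."""
--     if not text:
--         return ''
--     text = unicodedata.normalize('NFKD', text)
--     text = text.replace('\xa0', ' ').replace('\n', ' ').replace('\r', '')
--     text = ' '.join(text.split())
--     return text.strip()
--
-- def _match_model(model_raw: str, model_map: dict):
--     """Match a raw model string against a model map, longest key first."""
--     model_norm = _normalize(model_raw).upper().replace('-', ' ')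
--     # Sort keys by length descending so longer/more specific keys match first
--     sorted_keys = sorted(model_map.keys(), key=len, reverse=True)
--     for key in sorted_keys:
--         key_norm = _normalize(key).upper().replace('-', ' ')
--         if key_norm in model_norm:
--             return model_map[key]
--     return None
-- ===== SOURCE B (Python) =====
-- import unicodedata
--
-- def _normalize(text: str) -> str:
--     """Normalize text: remove non-breaking spaces, newlines, extra whitespace."""
--     if not text:
--         return ''
--     text = unicodedata.normalize('NFKD', text)
--     text = text.replace('\xa0', ' ').replace('\n', ' ').replace('\r', '')
--     text = ' '.join(text.split())
--     return text.strip()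
--
-- def _match_model(model_raw: str, model_map: dict):
--     """Single longest-match scan in insertion order (strict '>' keeps first tie)."""
--     model_norm = _normalize(model_raw).upper().replace('-', ' ')
--     best_key = None
--     for key in model_map.keys():
--         key_norm = _normalize(key).upper().replace('-', ' ')
--         if key_norm in model_norm and (best_key is None or len(key) > len(best_key)):
--             best_key = key
--     return model_map[best_key] if best_key is not None else None
-- ===== Notes on version B (the rewrite author's own statement) =====
-- stated objective: simpler
-- what changed: Replaced sorting the keys by length descending and returning the first substring match with a single scan over the keys in insertion order that tracks the longest matching key (strict '>' so the first key wins length ties), eliminating the sort.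
import Mathlib
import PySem

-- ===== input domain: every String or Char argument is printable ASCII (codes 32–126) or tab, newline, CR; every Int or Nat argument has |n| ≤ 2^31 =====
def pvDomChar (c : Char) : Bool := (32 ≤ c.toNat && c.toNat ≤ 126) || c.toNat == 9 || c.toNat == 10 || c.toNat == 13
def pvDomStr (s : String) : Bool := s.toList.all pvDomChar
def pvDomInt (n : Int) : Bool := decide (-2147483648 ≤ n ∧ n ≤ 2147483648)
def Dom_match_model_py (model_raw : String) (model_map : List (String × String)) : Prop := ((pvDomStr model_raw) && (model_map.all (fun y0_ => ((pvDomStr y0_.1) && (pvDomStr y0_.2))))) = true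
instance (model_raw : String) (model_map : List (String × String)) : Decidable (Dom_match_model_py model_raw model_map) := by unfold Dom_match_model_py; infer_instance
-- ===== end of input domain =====

-- B replaces A's sort-keys-by-length-descending-then-take-first-match with a single
-- longest-match scan over the keys in insertion order (strict '>' tie-break): simpler, no sort.

-- ===== PORT A =====
-- _normalize, shared module helper of both Pythons.
-- unicodedata.normalize('NFKD', ·) is the identity on the printable-ASCII domain Dom, where it is exact;
-- the '\xa0' replace is a no-op there but is kept literally.
def pyNormalize (text : String) : String :=
  if text == "" then ""
  else
    let t := PySem.Str.replace (PySem.Str.replace (PySem.Str.replace text "\u00A0" " ") "\n" " ") "\r" ""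
    let t := PySem.Str.join " " (PySem.Str.split₀ t)
    PySem.Str.strip t

-- the repeated expression `_normalize(s).upper().replace('-', ' ')` of both Pythons
def pvNormKey (s : String) : String :=
  PySem.Str.replace (PySem.Str.upper (pyNormalize s)) "-" " "

-- A's `for key in sorted_keys: …` loop (returns model_map[key] on the first match)
def matchLoopA (d : PySem.Dict String String) (modelNorm : String) : List String → Option String
  | [] => none
  | k :: rest =>
      if PySem.Str.isIn (pvNormKey k) modelNorm then d.get? k else matchLoopA d modelNorm rest

def match_model_py (model_raw : String) (model_map : List (String × String)) : Option String :=
  let modelNorm := pvNormKey model_raw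
  let d := PySem.Dict.ofList model_map
  let sortedKeys := PySem.List.sorted d.keys (fun k => PySem.Str.len k) true
  matchLoopA d modelNorm sortedKeys

-- ===== PORT B =====
-- B's loop body: keep the best (longest, first-wins-on-ties) matching key so far
def pvBestStep (modelNorm : String) (best : Option String) (key : String) : Option String :=
  if PySem.Str.isIn (pvNormKey key) modelNorm &&
     (match best with
      | none => true
      | some b => decide (PySem.Str.len b < PySem.Str.len key))
  then some key else best

def match_model_py_alt (model_raw : String) (model_map : List (String × String)) : Option String :=
  let modelNorm := pvNormKey model_raw
  let d := PySem.Dict.ofList model_map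
  let best := d.keys.foldl (pvBestStep modelNorm) none
  match best with
  | some k => d.get? k
  | none => none

-- ===== PRECONDITION & SPEC =====
def Spec_match_model_py (model_raw : String) (model_map : List (String × String)) (out : Option String) : Prop := out = match_model_py_alt model_raw model_map
instance (model_raw : String) (model_map : List (String × String)) (out : Option String) : Decidable (Spec_match_model_py model_raw model_map out) := by unfold Spec_match_model_py; infer_instance

-- ===== CLAIM (what is proved, stated in full; the proofs are below) =====
def Claim_equal_match_model_py : Prop := ∀ (model_raw : String) (model_map : List (String × String)), Dom_match_model_py model_raw model_map → Spec_match_model_py model_raw model_map (match_model_py model_raw model_map)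

-- ===== LEMMAS AND PROOFS =====

-- the generic best-so-far step, parametrised by the match predicate P and the length key L
def pvGStep {α : Type} (P : α → Bool) (L : α → Int) (best : Option α) (x : α) : Option α :=
  if P x && (match best with | none => true | some b => decide (L b < L x)) then some x else best

lemma mem_insertBy {α : Type} (before : α → α → Bool) (x z : α) :
    ∀ l : List α, z ∈ PySem.List.insertBy before x l ↔ z = x ∨ z ∈ l := by
  intro l
  induction l with
  | nil => simp [PySem.List.insertBy]
  | cons y ys ih =>
      by_cases h : before x y = true
      · simp [PySem.List.insertBy, h]
      · simp [PySem.List.insertBy, h, ih]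
        tauto

lemma pairwise_insertBy {α : Type} (L : α → Int) (x : α) :
    ∀ l : List α, l.Pairwise (fun a b => L b ≤ L a) →
      (PySem.List.insertBy (fun a b => decide (L b < L a)) x l).Pairwise (fun a b => L b ≤ L a) := by
  intro l
  induction l with
  | nil => intro _; simp [PySem.List.insertBy]
  | cons y ys ih =>
      intro hp
      rw [List.pairwise_cons] at hp
      by_cases h : L y < L x
      · have hx : PySem.List.insertBy (fun a b => decide (L b < L a)) x (y :: ys) = x :: y :: ys := by
          simp [PySem.List.insertBy, h]
        rw [hx, List.pairwise_cons]
        refine ⟨?_, List.pairwise_cons.mpr hp⟩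
        intro z hz
        rcases List.mem_cons.mp hz with rfl | hz
        · omega
        · have := hp.1 z hz; omega
      · have hx : PySem.List.insertBy (fun a b => decide (L b < L a)) x (y :: ys) =
            y :: PySem.List.insertBy (fun a b => decide (L b < L a)) x ys := by
          simp [PySem.List.insertBy, h]
        rw [hx, List.pairwise_cons]
        refine ⟨?_, ih hp.2⟩
        intro z hz
        rcases (mem_insertBy _ x z ys).mp hz with rfl | hz
        · omega
        · exact hp.1 z hz

lemma find?_insertBy {α : Type} (P : α → Bool) (L : α → Int) (x : α) :
    ∀ l : List α, l.Pairwise (fun a b => L b ≤ L a) →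
      List.find? P (PySem.List.insertBy (fun a b => decide (L b < L a)) x l) =
        pvGStep P L (List.find? P l) x := by
  intro l
  induction l with
  | nil =>
      intro _
      by_cases hP : P x <;> simp [PySem.List.insertBy, pvGStep, List.find?, hP]
  | cons y ys ih =>
      intro hp
      rw [List.pairwise_cons] at hp
      by_cases h : L y < L x
      · have hx : PySem.List.insertBy (fun a b => decide (L b < L a)) x (y :: ys) = x :: y :: ys := by
          simp [PySem.List.insertBy, h]
        rw [hx]
        by_cases hP : P x
        · -- x matches; any first matcher b of y::ys has L b ≤ L y < L x
          have hb : ∀ b, List.find? P (y :: ys) = some b → L b < L x := by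
            intro b hfind
            have hmem := List.mem_of_find?_eq_some hfind
            rcases List.mem_cons.mp hmem with rfl | hmem
            · exact h
            · have := hp.1 b hmem; omega
          cases hfy : List.find? P (y :: ys) with
          | none => simp [List.find?, hP, pvGStep]
          | some b =>
              have := hb b hfy
              simp [List.find?, hP, pvGStep, this]
        · simp [List.find?, hP, pvGStep]
      · have hx : PySem.List.insertBy (fun a b => decide (L b < L a)) x (y :: ys) =
            y :: PySem.List.insertBy (fun a b => decide (L b < L a)) x ys := by
          simp [PySem.List.insertBy, h]
        rw [hx]
        by_cases hPy : P y
        · have hLy : ¬ L y < L x := h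
          simp [List.find?, hPy, pvGStep, hLy]
        · simp only [List.find?, hPy]
          exact ih hp.2

lemma find?_foldl_insertBy {α : Type} (P : α → Bool) (L : α → Int) :
    ∀ (xs : List α) (acc : List α), acc.Pairwise (fun a b => L b ≤ L a) →
      List.find? P (xs.foldl (fun a x => PySem.List.insertBy (fun a b => decide (L b < L a)) x a) acc) =
        xs.foldl (pvGStep P L) (List.find? P acc) := by
  intro xs
  induction xs with
  | nil => intro acc _; rfl
  | cons x xs ih =>
      intro acc hp
      simp only [List.foldl_cons]
      rw [ih _ (pairwise_insertBy L x acc hp), find?_insertBy P L x acc hp]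

lemma find?_sorted_rev {α : Type} (P : α → Bool) (L : α → Int) (xs : List α) :
    List.find? P (PySem.List.sorted xs L true) = xs.foldl (pvGStep P L) none := by
  have h := find?_foldl_insertBy P L xs [] (by simp)
  simpa [PySem.List.sorted] using h

lemma matchLoopA_eq_find? (d : PySem.Dict String String) (mn : String) :
    ∀ ks : List String,
      matchLoopA d mn ks = (List.find? (fun k => PySem.Str.isIn (pvNormKey k) mn) ks).bind d.get? := by
  intro ks
  induction ks with
  | nil => rfl
  | cons k rest ih =>
      simp only [matchLoopA, ih, PySem.Str.isIn_eq]
      cases h : PySem.Chars.isIn (pvNormKey k).toList mn.toList <;> simp [h]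

lemma pvBestStep_eq_gstep (mn : String) :
    pvBestStep mn = pvGStep (fun k => PySem.Str.isIn (pvNormKey k) mn) (fun k => PySem.Str.len k) := by
  funext best key
  cases best <;> rfl

-- ===== VERDICT (by name: the statement is the Claim_ definition above) =====
theorem match_model_py_spec : Claim_equal_match_model_py := by
  intro model_raw model_map _
  unfold Spec_match_model_py match_model_py match_model_py_alt
  simp only []
  rw [matchLoopA_eq_find?, find?_sorted_rev, ← pvBestStep_eq_gstep]
  cases (PySem.Dict.ofList model_map).keys.foldl (pvBestStep (pvNormKey model_raw)) none <;> rfl
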